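-- pv_equiv track=rewrite | github.com/YumYumCI/gpt-researcher | custom_agents/agents/blogger/publisher.py | _slugify_filename
-- ===== SOURCE A (Python) =====
-- def _slugify_filename(filename: str) -> str:
--     """Convert a string to a safe filename"""
--     safe_chars = ('-', '_', '.')
--     filename = ''.join(
--         c if c.isalnum() or c in safe_chars else '-'
--         for c in filename
--     )
--     # Remove consecutive dashes and leading/trailing dashes
--     filename = '-'.join(filter(None, filename.split('-')))
--     return filename.strip('-')
-- ===== SOURCE B (Python) =====
-- def _slugify_filename(filename: str) -> str:
--     """Convert a string to a safe filename (single pass with a pending-dash flag)."""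
--     out = []
--     pending = False
--     for c in filename:
--         if c.isalnum() or c in ('-', '_', '.'):
--             m = c
--         else:
--             m = '-'
--         if m == '-':
--             if out:
--                 pending = True
--         else:
--             if pending:
--                 out.append('-')
--                 pending = False
--             out.append(m)
--     return ''.join(out)
-- ===== Notes on version B (the rewrite author's own statement) =====
-- stated objective: alternative
-- what changed: Replaces A's multi-phase pipeline (map every char, split the result on '-', filter out empty pieces, re-join with '-', strip '-') by a single left-to-right pass that keeps an output list and a pending-dash flag, emitting at most one dash between runs and never a leading or trailing one.
import Mathlib
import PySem

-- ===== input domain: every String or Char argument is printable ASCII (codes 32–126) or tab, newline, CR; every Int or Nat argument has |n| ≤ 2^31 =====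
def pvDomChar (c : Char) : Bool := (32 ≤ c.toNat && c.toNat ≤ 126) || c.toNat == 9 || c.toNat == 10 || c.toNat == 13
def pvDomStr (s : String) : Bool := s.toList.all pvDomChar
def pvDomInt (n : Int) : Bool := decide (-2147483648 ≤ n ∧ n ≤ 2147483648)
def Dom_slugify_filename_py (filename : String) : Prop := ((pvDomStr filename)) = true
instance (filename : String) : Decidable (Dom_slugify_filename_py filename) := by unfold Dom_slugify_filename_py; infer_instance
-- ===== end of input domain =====

-- B replaces A's map / split('-') / filter / join / strip('-') pipeline by one pass over the
-- characters with a pending-dash flag (objective: simpler decomposition, same O(n) cost).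

-- ===== PORT A =====
-- the comprehension body 'c if c.isalnum() or c in safe_chars else "-"' (shared by both Pythons)
def slugChar (c : Char) : Char :=
  if PySem.Chars.isalnum c || c ∈ ['-', '_', '.'] then c else '-'

def slugify_filename_py (filename : String) : String :=
  let mapped : List Char := filename.toList.map slugChar
  let joined : List Char :=
    PySem.Chars.join ['-'] ((PySem.Chars.splitOn mapped ['-']).filter (fun p => p ≠ []))
  String.ofList (PySem.Chars.stripChars joined ['-'])

-- ===== PORT B =====
-- loop body: m = '-' → maybe set pending; else flush a pending '-' and append m
def slugStep' (st : List Char × Bool) (m : Char) : List Char × Bool :=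
  if m = '-' then (st.1, if st.1 ≠ [] then true else st.2)
  else (st.1 ++ (if st.2 then ['-'] else []) ++ [m], false)

def slugStep (st : List Char × Bool) (c : Char) : List Char × Bool :=
  slugStep' st (slugChar c)

def slugify_filename_py_alt (filename : String) : String :=
  String.ofList (filename.toList.foldl slugStep ([], false)).1

-- ===== PRECONDITION & SPEC =====
def Spec_slugify_filename_py (filename : String) (out : String) : Prop := out = slugify_filename_py_alt filename
instance (filename : String) (out : String) : Decidable (Spec_slugify_filename_py filename out) := by unfold Spec_slugify_filename_py; infer_instance

-- ===== CLAIM (what is proved, stated in full; the proofs are below) =====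
def Claim_equal_slugify_filename_py : Prop := ∀ (filename : String), Dom_slugify_filename_py filename → Spec_slugify_filename_py filename (slugify_filename_py filename)

-- ===== LEMMAS AND PROOFS =====

-- the canonical result on the mapped characters: `normSlug false` from outside a group
-- (leading dashes dropped), `normSlug true` just after an emitted character
def normSlug : Bool → List Char → List Char
  | _, [] => []
  | b, c :: L =>
    if c = '-' then
      if b then (match normSlug false L with | [] => [] | r => '-' :: r)
      else normSlug false L
    else c :: normSlug true L

-- PySem.Chars.splitOn with a one-character separator is Mathlib's List.splitOnP (· == c)
theorem splitOn_go_spec (c : Char) :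
    ∀ (fuel : Nat) (l cur : List Char) (acc : List (List Char)), l.length ≤ fuel →
      PySem.Chars.splitOn.go [c] fuel l cur acc
        = acc.reverse ++ (List.splitOnP (· == c) l).modifyHead (cur.reverse ++ ·) := by
  intro fuel
  induction fuel with
  | zero =>
    intro l cur acc hl
    have hnil : l = [] := List.eq_nil_of_length_eq_zero (Nat.le_zero.mp hl)
    subst hnil
    show ((cur.reverse ++ []) :: acc).reverse = _
    simp [List.splitOnP_nil]
  | succ n ih =>
    intro l cur acc hl
    cases l with
    | nil =>
      show (cur.reverse :: acc).reverse = _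
      simp [List.splitOnP_nil]
    | cons a rest =>
      have hstep : PySem.Chars.splitOn.go [c] (n + 1) (a :: rest) cur acc
          = if [c].isPrefixOf (a :: rest)
            then PySem.Chars.splitOn.go [c] n (List.drop [c].length (a :: rest)) []
                   (cur.reverse :: acc)
            else PySem.Chars.splitOn.go [c] n rest (a :: cur) acc := rfl
      rw [hstep]
      have hl' : rest.length ≤ n := by
        simpa [Nat.succ_le_succ_iff] using hl
      by_cases hca : c = a
      · subst hca
        have hpre : [c].isPrefixOf (c :: rest) = true := by simp [List.isPrefixOf]
        rw [if_pos hpre]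
        rw [show List.drop [c].length (c :: rest) = rest from rfl]
        rw [ih rest [] (cur.reverse :: acc) hl']
        rw [List.splitOnP_cons]
        simp
        cases List.splitOnP (· == c) rest with
        | nil => rfl
        | cons g gs => rfl
      · have hpre : [c].isPrefixOf (a :: rest) = false := by
          simp [List.isPrefixOf, hca]
        rw [hpre]
        simp only [Bool.false_eq_true, if_false]
        rw [ih rest (a :: cur) acc hl']
        rw [List.splitOnP_cons]
        have hpa : (a == c) = false := by
          simp; exact fun h => hca h.symm
        simp only [hpa, Bool.false_eq_true, if_false]
        congr 1
        cases List.splitOnP (· == c) rest with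
        | nil => simp
        | cons g gs => simp

theorem chars_splitOn_single (s : List Char) (c : Char) :
    PySem.Chars.splitOn s [c] = List.splitOnP (· == c) s := by
  unfold PySem.Chars.splitOn
  rw [splitOn_go_spec c (s.length + 1) s [] [] (by omega)]
  simp only [List.reverse_nil, List.nil_append]
  cases List.splitOnP (· == c) s with
  | nil => simp
  | cons g gs => simp

theorem splitOnP_ne_nil (p : Char → Bool) (l : List Char) : List.splitOnP p l ≠ [] := by
  induction l with
  | nil => simp [List.splitOnP_nil]
  | cons a rest ih =>
    rw [List.splitOnP_cons]
    split_ifs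
    · simp
    · cases h : List.splitOnP p rest with
      | nil => exact absurd h ih
      | cons g gs => simp

def tailPart (F : List (List Char)) : List Char :=
  match F with
  | [] => []
  | _ :: _ => '-' :: List.intercalate ['-'] F

theorem intercalate_cons_tailPart (x : List Char) (F : List (List Char)) :
    List.intercalate ['-'] (x :: F) = x ++ tailPart F := by
  cases F with
  | nil => simp [tailPart, List.intercalate]
  | cons f fs => simp [tailPart, List.intercalate, List.intersperse]

theorem intercalate_filter_ne_nil (f : List Char) (fs : List (List Char)) (hf : f ≠ []) :
    List.intercalate ['-'] (f :: fs) ≠ [] := by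
  rw [intercalate_cons_tailPart]
  intro h
  exact hf (List.append_eq_nil_iff.mp h).1

-- A's split/filter/join pipeline computes normSlug
theorem pipeline_eq_normSlug (L : List Char) :
    (normSlug true L
       = (List.splitOnP (· == '-') L).headI
           ++ tailPart (((List.splitOnP (· == '-') L).tail).filter (fun p => p ≠ [])))
    ∧ normSlug false L
       = List.intercalate ['-'] ((List.splitOnP (· == '-') L).filter (fun p => p ≠ [])) := by
  induction L with
  | nil =>
    constructor <;> simp [normSlug, List.splitOnP_nil, tailPart, List.intercalate]
  | cons a rest ih =>
    obtain ⟨ihM, ihN⟩ := ih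
    rw [List.splitOnP_cons]
    by_cases ha : a = '-'
    · subst ha
      simp only [BEq.rfl, if_pos]
      constructor
      · -- M at '-'::rest
        simp only [List.headI, List.tail_cons, List.nil_append]
        show (match normSlug false rest with | [] => [] | r => '-' :: r) = _
        rw [ihN]
        cases hF : (List.splitOnP (· == '-') rest).filter (fun p => p ≠ []) with
        | nil => simp [tailPart, List.intercalate]
        | cons f fs =>
          have hmem : f ∈ (List.splitOnP (· == '-') rest).filter (fun p => p ≠ []) := by
            rw [hF]; exact List.mem_cons_self
          have hf : f ≠ [] := by simpa using (List.mem_filter.mp hmem).2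
          have hne := intercalate_filter_ne_nil f fs hf
          obtain ⟨y, ys, hys⟩ := List.exists_cons_of_ne_nil hne
          rw [hys]
          simp [tailPart, ← hys]
      · -- N at '-'::rest
        have hL : normSlug false ('-' :: rest) = normSlug false rest := by simp [normSlug]
        rw [hL, List.filter_cons]
        simp only [ne_eq, not_true_eq_false, decide_false, Bool.false_eq_true, if_false]
        exact ihN
    · have hba : (a == '-') = false := by simp [ha]
      simp only [hba, Bool.false_eq_true, if_false]
      cases hsp : List.splitOnP (· == '-') rest with
      | nil => exact absurd hsp (splitOnP_ne_nil _ _)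
      | cons g gs =>
        rw [hsp] at ihM ihN
        simp only [List.modifyHead_cons]
        constructor
        · -- M at a::rest
          have h1 : normSlug true (a :: rest) = a :: normSlug true rest := by
            simp [normSlug, ha]
          rw [h1, ihM]
          simp [List.headI, List.tail]
        · -- N at a::rest
          have h1 : normSlug false (a :: rest) = a :: normSlug true rest := by
            simp [normSlug, ha]
          have hgfilter : ((a :: g) :: gs).filter (fun p => p ≠ [])
              = (a :: g) :: gs.filter (fun p => p ≠ []) := by
            simp
          rw [h1, hgfilter, intercalate_cons_tailPart, ihM]
          simp [List.headI, List.tail]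

-- B's fold computes normSlug
theorem fold_eq_normSlug (L : List Char) :
    (∀ out : List Char, out ≠ [] →
        (L.foldl slugStep' (out, false)).1 = out ++ normSlug true L
      ∧ (L.foldl slugStep' (out, true)).1 = out ++ normSlug true ('-' :: L))
    ∧ (L.foldl slugStep' ([], false)).1 = normSlug false L := by
  induction L with
  | nil =>
    refine ⟨fun out hout => ⟨by simp [normSlug], by simp [normSlug]⟩, by simp [normSlug]⟩
  | cons m rest ih =>
    obtain ⟨ihO, ihZ⟩ := ih
    by_cases hm : m = '-'
    · subst hm
      constructor
      · intro out hout
        constructor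
        · -- (out, false), out ≠ [], next is '-': pending becomes true
          have hstep : slugStep' (out, false) '-' = (out, true) := by
            simp [slugStep', hout]
          rw [List.foldl_cons, hstep]
          exact (ihO out hout).2
        · -- (out, true), next is '-': pending stays true
          have hstep : slugStep' (out, true) '-' = (out, true) := by
            simp [slugStep', hout]
          rw [List.foldl_cons, hstep, (ihO out hout).2]
          simp [normSlug]
      · -- ([], false), leading '-': dropped
        have hstep : slugStep' (([] : List Char), false) '-' = ([], false) := by
          simp [slugStep']
        rw [List.foldl_cons, hstep, ihZ]
        simp [normSlug]
    · have hflushF : ∀ out : List Char, slugStep' (out, false) m = (out ++ [m], false) := by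
        intro out; simp [slugStep', hm]
      have hflushT : ∀ out : List Char, slugStep' (out, true) m = (out ++ ['-'] ++ [m], false) := by
        intro out; simp [slugStep', hm, List.append_assoc]
      constructor
      · intro out hout
        constructor
        · rw [List.foldl_cons, hflushF, (ihO (out ++ [m]) (by simp)).1]
          simp [normSlug, hm]
        · rw [List.foldl_cons, hflushT, (ihO (out ++ ['-'] ++ [m]) (by simp)).1]
          simp [normSlug, hm]
      · rw [List.foldl_cons, hflushF, (ihO ([] ++ [m]) (by simp)).1]
        simp [normSlug, hm]

-- normSlug never ends with a dash
theorem normSlug_getLast (L : List Char) :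
    ∀ b, (normSlug b L).getLast? ≠ some '-' := by
  induction L with
  | nil => intro b; simp [normSlug]
  | cons a rest ih =>
    intro b
    by_cases ha : a = '-'
    · subst ha
      cases b with
      | false => simpa [normSlug] using ih false
      | true =>
        show (match normSlug false rest with | [] => [] | r => '-' :: r).getLast? ≠ some '-'
        cases h : normSlug false rest with
        | nil => simp
        | cons y ys =>
          have := ih false
          rw [h] at this
          simpa [List.getLast?_cons_cons] using this
    · have h1 : normSlug b (a :: rest) = a :: normSlug true rest := by
        simp [normSlug, ha]
      rw [h1]
      cases h : normSlug true rest with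
      | nil => simp [ha]
      | cons y ys =>
        have := ih true
        rw [h] at this
        simpa [List.getLast?_cons_cons] using this

-- normSlug false never starts with a dash
theorem normSlug_head (L : List Char) : (normSlug false L).head? ≠ some '-' := by
  induction L with
  | nil => simp [normSlug]
  | cons a rest ih =>
    by_cases ha : a = '-'
    · subst ha; simpa [normSlug] using ih
    · simp [normSlug, ha]

-- strip('-') is the identity on a string with no leading/trailing dash
theorem stripChars_noop (s : List Char) (h1 : s.head? ≠ some '-')
    (h2 : s.getLast? ≠ some '-') : PySem.Chars.stripChars s ['-'] = s := by
  have hdw : ∀ t : List Char, t.head? ≠ some '-' →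
      List.dropWhile (fun c => List.contains ['-'] c) t = t := by
    intro t ht
    cases t with
    | nil => simp
    | cons a l =>
      rw [List.dropWhile_cons]
      have : a ≠ '-' := by intro h; exact ht (by simp [h])
      simp [this]
  show (List.dropWhile (fun c => List.contains ['-'] c)
      (List.dropWhile (fun c => List.contains ['-'] c) s).reverse).reverse = s
  rw [hdw s h1]
  rw [hdw s.reverse (by rw [List.head?_reverse]; exact h2)]
  exact List.reverse_reverse s

-- ===== VERDICT (by name: the statement is the Claim_ definition above) =====
theorem slugify_filename_py_spec : Claim_equal_slugify_filename_py := by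
  intro filename _
  show slugify_filename_py filename = slugify_filename_py_alt filename
  have hB : filename.toList.foldl slugStep (([] : List Char), false)
      = (filename.toList.map slugChar).foldl slugStep' ([], false) := by
    rw [List.foldl_map]; rfl
  simp only [slugify_filename_py, slugify_filename_py_alt]
  rw [hB]
  congr 1
  set M : List Char := filename.toList.map slugChar with hM
  rw [chars_splitOn_single M '-']
  rw [show PySem.Chars.join ['-'] ((List.splitOnP (· == '-') M).filter (fun p => p ≠ []))
        = List.intercalate ['-'] ((List.splitOnP (· == '-') M).filter (fun p => p ≠ []))
      from rfl]
  rw [← (pipeline_eq_normSlug M).2]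
  rw [stripChars_noop _ (normSlug_head M) (normSlug_getLast M false)]
  exact ((fold_eq_normSlug M).2).symm
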